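-- pv_equiv track=rewrite | github.com/UiPath/prodev-lab | resources/main5_permission_check_hr.py | is_valid_code
-- ===== SOURCE A (Python) =====
-- def is_valid_code(code: str | None) -> bool:
--     """Validate a 4-digit code that is not all the same digit and not consecutive (e.g., 1234)."""
--     if not code or len(code) != 4 or not code.isdigit():
--         return False
--     # Reject all identical digits (e.g., 1111)
--     if len(set(code)) == 1:
--         return False
--     # Reject strictly ascending consecutive sequences (e.g., 0123, 1234, ..., 6789)
--     digits = [int(c) for c in code]
--     if all(digits[i + 1] - digits[i] == 1 for i in range(3)):
--         return False
--     return True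
-- ===== SOURCE B (Python) =====
-- # Table-driven rewrite: one precomputed set of the 17 banned codes
-- # (10 all-same + 7 ascending-consecutive) replaces both per-code scans.
-- _BANNED = frozenset({
--     "0000", "1111", "2222", "3333", "4444",
--     "5555", "6666", "7777", "8888", "9999",
--     "0123", "1234", "2345", "3456", "4567", "5678", "6789",
-- })
--
--
-- def is_valid_code(code: str | None) -> bool:
--     """Validate a 4-digit code that is not all the same digit and not consecutive (e.g., 1234)."""
--     if not code or len(code) != 4 or not code.isdigit():
--         return False
--     return code not in _BANNED
-- ===== Notes on version B (the rewrite author's own statement) =====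
-- stated objective: simpler
-- what changed: B replaces A's set-cardinality check and adjacent-difference loop over int-converted digits with a single membership test against one precomputed table of the 17 banned codes (10 repdigits + 7 ascending runs).
import Mathlib
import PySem

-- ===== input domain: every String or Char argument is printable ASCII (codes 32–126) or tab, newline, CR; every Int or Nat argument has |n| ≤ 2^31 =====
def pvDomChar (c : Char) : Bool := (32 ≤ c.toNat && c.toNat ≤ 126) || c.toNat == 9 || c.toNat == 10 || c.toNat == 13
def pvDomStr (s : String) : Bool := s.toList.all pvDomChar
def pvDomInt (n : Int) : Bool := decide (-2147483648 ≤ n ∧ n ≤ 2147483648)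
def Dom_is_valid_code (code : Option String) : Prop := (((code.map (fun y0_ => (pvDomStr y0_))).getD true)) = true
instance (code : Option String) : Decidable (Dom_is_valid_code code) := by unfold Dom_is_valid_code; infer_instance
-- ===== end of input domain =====

-- B replaces A's set-cardinality check and adjacent-difference loop with one membership
-- test in a precomputed table of the 17 banned codes (objective: simpler).

-- ===== PORT A =====
def is_valid_code (code : Option String) : Bool :=
  match code with
  | none => false
  | some s =>
    if s == "" || PySem.Str.len s != 4 || !PySem.Str.strIsdigit s then false
    else if (PySem.Set.ofList s.toList).length == 1 then false
    else
      -- int(c) for a single digit char is its code point minus 48; exact here because the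
      -- isdigit guard above guarantees every character is an ASCII digit on the stated domain
      let digits : List Int := s.toList.map (fun ch => ((ch.toNat : Int) - 48))
      if (PySem.List.pyRange 0 3 1).all
          (fun i => PySem.List.pyGetD digits (i+1) 0 - PySem.List.pyGetD digits i 0 == 1)
      then false else true

-- ===== PORT B =====
-- the module-level frozenset _BANNED of Source B
def pvBanned : PySem.Set (List Char) := PySem.Set.ofList
  ["0000".toList,"1111".toList,"2222".toList,"3333".toList,"4444".toList,
   "5555".toList,"6666".toList,"7777".toList,"8888".toList,"9999".toList,
   "0123".toList,"1234".toList,"2345".toList,"3456".toList,"4567".toList,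
   "5678".toList,"6789".toList]

def is_valid_code_alt (code : Option String) : Bool :=
  match code with
  | none => false
  | some s =>
    if s == "" || PySem.Str.len s != 4 || !PySem.Str.strIsdigit s then false
    else !PySem.Set.contains pvBanned s.toList

-- ===== PRECONDITION & SPEC =====
def Spec_is_valid_code (code : Option String) (out : Bool) : Prop := out = is_valid_code_alt code
instance (code : Option String) (out : Bool) : Decidable (Spec_is_valid_code code out) := by unfold Spec_is_valid_code; infer_instance

-- ===== CLAIM (what is proved, stated in full; the proofs are below) =====
def Claim_equal_is_valid_code : Prop := ∀ (code : Option String), Dom_is_valid_code code → Spec_is_valid_code code (is_valid_code code)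

-- ===== LEMMAS AND PROOFS =====

theorem char_eq_iff (a b : Char) : a = b ↔ a.toNat = b.toNat :=
  ⟨fun h => by rw [h], fun h => Char.ext (UInt32.toNat_inj.mp h)⟩

theorem digit_bounds (c : Char) (h : PySem.Chars.isdigit c = true) :
    48 ≤ c.toNat ∧ c.toNat ≤ 57 := by
  simp [PySem.Chars.isdigit, Char.le_def, UInt32.le_iff_toNat_le] at h
  exact h

-- the post-guard logic of both ports, reduced to linear arithmetic on the four code points
theorem arith3 (x y z w : Nat)
    (hx1 : 48 ≤ x) (hx2 : x ≤ 57) (hy1 : 48 ≤ y) (hy2 : y ≤ 57)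
    (hz1 : 48 ≤ z) (hz2 : z ≤ 57) (hw1 : 48 ≤ w) (hw2 : w ≤ 57) :
    (((¬y = x ∨ ¬z = x) ∨ ¬w = x) ∧
      (¬(y:Int) - (x:Int) = 1 ∨ ¬(z:Int) - (y:Int) = 1 ∨ ¬(w:Int) - (z:Int) = 1)) ↔
    ((¬x = 48 ∨ ¬y = 48 ∨ ¬z = 48 ∨ ¬w = 48) ∧
    (¬x = 49 ∨ ¬y = 49 ∨ ¬z = 49 ∨ ¬w = 49) ∧
    (¬x = 50 ∨ ¬y = 50 ∨ ¬z = 50 ∨ ¬w = 50) ∧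
    (¬x = 51 ∨ ¬y = 51 ∨ ¬z = 51 ∨ ¬w = 51) ∧
    (¬x = 52 ∨ ¬y = 52 ∨ ¬z = 52 ∨ ¬w = 52) ∧
    (¬x = 53 ∨ ¬y = 53 ∨ ¬z = 53 ∨ ¬w = 53) ∧
    (¬x = 54 ∨ ¬y = 54 ∨ ¬z = 54 ∨ ¬w = 54) ∧
    (¬x = 55 ∨ ¬y = 55 ∨ ¬z = 55 ∨ ¬w = 55) ∧
    (¬x = 56 ∨ ¬y = 56 ∨ ¬z = 56 ∨ ¬w = 56) ∧
    (¬x = 57 ∨ ¬y = 57 ∨ ¬z = 57 ∨ ¬w = 57) ∧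
    (¬x = 48 ∨ ¬y = 49 ∨ ¬z = 50 ∨ ¬w = 51) ∧
    (¬x = 49 ∨ ¬y = 50 ∨ ¬z = 51 ∨ ¬w = 52) ∧
    (¬x = 50 ∨ ¬y = 51 ∨ ¬z = 52 ∨ ¬w = 53) ∧
    (¬x = 51 ∨ ¬y = 52 ∨ ¬z = 53 ∨ ¬w = 54) ∧
    (¬x = 52 ∨ ¬y = 53 ∨ ¬z = 54 ∨ ¬w = 55) ∧
    (¬x = 53 ∨ ¬y = 54 ∨ ¬z = 55 ∨ ¬w = 56) ∧
    (¬x = 54 ∨ ¬y = 55 ∨ ¬z = 56 ∨ ¬w = 57)) := by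
  constructor
  · rintro ⟨h1, h2⟩
    refine ⟨?_,?_,?_,?_,?_,?_,?_,?_,?_,?_,?_,?_,?_,?_,?_,?_,?_⟩ <;>
      (by_contra hq; simp only [not_or, not_not] at hq; omega)
  · rintro ⟨c1,c2,c3,c4,c5,c6,c7,c8,c9,c10,c11,c12,c13,c14,c15,c16,c17⟩
    constructor
    · by_contra hq
      simp only [not_or, not_not] at hq
      obtain ⟨⟨e1, e2⟩, e3⟩ := hq
      clear c11 c12 c13 c14 c15 c16 c17
      interval_cases x <;> simp_all
    · by_contra hq
      simp only [not_or, not_not] at hq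
      obtain ⟨e1, e2, e3⟩ := hq
      clear c1 c2 c3 c4 c5 c6 c7 c8 c9 c10
      have f1 : y = x + 1 := by omega
      have f2 : z = x + 2 := by omega
      have f3 : w = x + 3 := by omega
      subst f1 f2 f3
      interval_cases x <;> simp_all

theorem set_len_one (a b c d : Char) :
    ((PySem.Set.ofList [a,b,c,d]).length == 1) = (b == a && c == a && d == a) := by
  by_cases h1 : b = a <;> by_cases h2 : c = a <;> by_cases h3 : c = b <;>
    by_cases h4 : d = a <;> by_cases h5 : d = b <;> by_cases h6 : d = c <;>
    simp_all [PySem.Set.ofList, PySem.Set.add, PySem.Set.contains]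

set_option maxHeartbeats 1600000 in
theorem key (a b c d : Char)
    (ha : 48 ≤ a.toNat ∧ a.toNat ≤ 57) (hb : 48 ≤ b.toNat ∧ b.toNat ≤ 57)
    (hc : 48 ≤ c.toNat ∧ c.toNat ≤ 57) (hd : 48 ≤ d.toNat ∧ d.toNat ≤ 57) :
    (if (PySem.Set.ofList [a,b,c,d]).length == 1 then false
     else
       let digits : List Int := [a,b,c,d].map (fun ch => ((ch.toNat : Int) - 48))
       if (PySem.List.pyRange 0 3 1).all
           (fun i => PySem.List.pyGetD digits (i+1) 0 - PySem.List.pyGetD digits i 0 == 1)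
       then false else true)
    = !PySem.Set.contains pvBanned [a,b,c,d] := by
  have hr : PySem.List.pyRange 0 3 1 = [0,1,2] := by decide
  rw [Bool.eq_iff_iff, set_len_one]
  simp [hr, PySem.Set.contains, PySem.Set.ofList, PySem.Set.add, pvBanned,
    char_eq_iff, PySem.List.pyGetD]
  exact arith3 a.toNat b.toNat c.toNat d.toNat ha.1 ha.2 hb.1 hb.2 hc.1 hc.2 hd.1 hd.2

-- ===== VERDICT (by name: the statement is the Claim_ definition above) =====
theorem is_valid_code_spec : Claim_equal_is_valid_code := by
  intro code _
  unfold Spec_is_valid_code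
  cases code with
  | none => rfl
  | some s =>
    show is_valid_code (some s) = is_valid_code_alt (some s)
    rw [is_valid_code, is_valid_code_alt]
    by_cases hg : (s == "" || PySem.Str.len s != 4 || !PySem.Str.strIsdigit s) = true
    · rw [if_pos hg, if_pos hg]
    · rw [if_neg hg, if_neg hg]
      simp only [Bool.or_eq_true, not_or, Bool.not_eq_true] at hg
      obtain ⟨⟨hne, hlen⟩, hdig⟩ := hg
      have hdig' : PySem.Chars.strIsdigit s.toList = true := by
        simpa using hdig
      have hlen' : s.toList.length = 4 := by
        simp only [bne_eq_false_iff_eq] at hlen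
        simpa using congrArg Int.toNat hlen
      obtain ⟨a, b, c, d, hl⟩ := List.length_eq_four.mp hlen'
      rw [hl] at hdig' ⊢
      simp only [PySem.Chars.strIsdigit, List.all, Bool.and_eq_true, List.isEmpty] at hdig'
      exact key a b c d (digit_bounds a (by simp_all)) (digit_bounds b (by simp_all))
        (digit_bounds c (by simp_all)) (digit_bounds d (by simp_all))
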